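-- pv_equiv track=rewrite | github.com/josephmnel111/EuchreProgram | Euchre.py | assignPoints
-- ===== SOURCE A (Python) =====
-- def assignPoints(playerCards, trump): #Assigns points to the card values
--     points = [-1, -1, -1, -1]
--     for a in range(4):
--         if (playerCards[a] == "9 Spades") :
--             points[a] = 9
--         elif (playerCards[a] == "10 Spades") :
--             points[a] = 10
--         elif (playerCards[a] == "Jack Spades") :
--             points[a] = 11
--         elif (playerCards[a] == "Queen Spades") :
--             points[a] = 12
--         elif (playerCards[a] == "King Spades") :
--             points[a] = 13
--         elif (playerCards[a] == "Ace Spades") :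
--             points[a] = 14
--         elif (playerCards[a] == "9 Clubs") :
--             points[a] = 9
--         elif (playerCards[a] == "10 Clubs") :
--             points[a] = 10
--         elif (playerCards[a] == "Jack Clubs") :
--             points[a] = 11
--         elif (playerCards[a] == "Queen Clubs") :
--             points[a] = 12
--         elif (playerCards[a] == "King Clubs") :
--             points[a] = 13
--         elif (playerCards[a] == "Ace Clubs") :
--             points[a] = 14
--         elif (playerCards[a] == "9 Hearts") :
--             points[a] = 9
--         elif (playerCards[a] == "10 Hearts") :
--             points[a] = 10
--         elif (playerCards[a] == "Jack Hearts") :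
--             points[a] = 11
--         elif (playerCards[a] == "Queen Hearts") :
--             points[a] = 12
--         elif (playerCards[a] == "King Hearts") :
--             points[a] = 13
--         elif (playerCards[a] == "Ace Hearts") :
--             points[a] = 14
--         elif (playerCards[a] == "9 Diamonds") :
--             points[a] = 9
--         elif (playerCards[a] == "10 Diamonds") :
--             points[a] = 10
--         elif (playerCards[a] == "Jack Diamonds") :
--             points[a] = 11
--         elif (playerCards[a] == "Queen Diamonds") :
--             points[a] = 12
--         elif (playerCards[a] == "King Diamonds") :
--             points[a] = 13
--         elif (playerCards[a] == "Ace Diamonds") :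
--             points[a] = 14
--
--         if trump in playerCards[a]: #If the card is trump, add 50 to the value
--             points[a] = points[a] + 50
--
--     return points
-- ===== SOURCE B (Python) =====
-- # B: parse the card name into rank/suit with str.partition and compute the value
-- # arithmetically as 9 + position of the rank in the rank order (no 24-way mapping).
-- RANKS = ["9", "10", "Jack", "Queen", "King", "Ace"]
-- SUITS = ["Spades", "Clubs", "Hearts", "Diamonds"]
--
--
-- def _cardValue(card):
--     rank, _, suit = card.partition(" ")
--     if suit in SUITS and rank in RANKS:
--         return 9 + RANKS.index(rank)
--     return -1
--
--
-- def assignPoints(playerCards, trump):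
--     points = []
--     for a in range(4):
--         v = _cardValue(playerCards[a])
--         if trump in playerCards[a]:
--             v += 50
--         points.append(v)
--     return points
-- ===== Notes on version B (the rewrite author's own statement) =====
-- stated objective: alternative
-- what changed: Instead of mapping each card through a 24-way equality chain, B parses the card name into rank and suit with str.partition, validates the suit, and computes the value arithmetically as 9 plus the rank's position in the rank order; the result list is built by append instead of mutating a preallocated list.
import Mathlib
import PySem

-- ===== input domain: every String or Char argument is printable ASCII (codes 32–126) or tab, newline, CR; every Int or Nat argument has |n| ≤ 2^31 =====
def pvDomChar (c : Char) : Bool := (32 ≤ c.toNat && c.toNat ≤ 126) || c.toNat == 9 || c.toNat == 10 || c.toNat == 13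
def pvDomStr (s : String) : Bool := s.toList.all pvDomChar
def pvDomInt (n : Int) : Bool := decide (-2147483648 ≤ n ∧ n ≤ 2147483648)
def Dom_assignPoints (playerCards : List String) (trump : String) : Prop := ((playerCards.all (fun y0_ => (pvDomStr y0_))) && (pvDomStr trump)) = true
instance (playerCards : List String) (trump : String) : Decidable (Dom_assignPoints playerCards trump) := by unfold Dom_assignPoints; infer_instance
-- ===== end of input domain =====

-- B parses the card name into rank/suit (str.partition) and computes the value as
-- 9 + the rank's position in the rank order, instead of A's 24-branch chain; objective: alternative.

-- ===== PORT A =====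
-- A's loop body has two statements; each is ported as a helper, applied for a = 0..3.
-- a is 0..3 (nonnegative), so points[a] = v is points.set a.toNat v; playerCards[a] is
-- pyGet? (in range under Pre_, so the .getD "" default is never used on admitted inputs).
-- First statement: the if/elif chain 'points[a] = <rank value>' (no branch: points unchanged).
def pvAssignRank (playerCards : List String) (points : List Int) (a : Int) : List Int :=
  if (PySem.List.pyGet? playerCards a).getD "" == "9 Spades" then points.set a.toNat 9
  else if (PySem.List.pyGet? playerCards a).getD "" == "10 Spades" then points.set a.toNat 10
  else if (PySem.List.pyGet? playerCards a).getD "" == "Jack Spades" then points.set a.toNat 11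
  else if (PySem.List.pyGet? playerCards a).getD "" == "Queen Spades" then points.set a.toNat 12
  else if (PySem.List.pyGet? playerCards a).getD "" == "King Spades" then points.set a.toNat 13
  else if (PySem.List.pyGet? playerCards a).getD "" == "Ace Spades" then points.set a.toNat 14
  else if (PySem.List.pyGet? playerCards a).getD "" == "9 Clubs" then points.set a.toNat 9
  else if (PySem.List.pyGet? playerCards a).getD "" == "10 Clubs" then points.set a.toNat 10
  else if (PySem.List.pyGet? playerCards a).getD "" == "Jack Clubs" then points.set a.toNat 11
  else if (PySem.List.pyGet? playerCards a).getD "" == "Queen Clubs" then points.set a.toNat 12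
  else if (PySem.List.pyGet? playerCards a).getD "" == "King Clubs" then points.set a.toNat 13
  else if (PySem.List.pyGet? playerCards a).getD "" == "Ace Clubs" then points.set a.toNat 14
  else if (PySem.List.pyGet? playerCards a).getD "" == "9 Hearts" then points.set a.toNat 9
  else if (PySem.List.pyGet? playerCards a).getD "" == "10 Hearts" then points.set a.toNat 10
  else if (PySem.List.pyGet? playerCards a).getD "" == "Jack Hearts" then points.set a.toNat 11
  else if (PySem.List.pyGet? playerCards a).getD "" == "Queen Hearts" then points.set a.toNat 12
  else if (PySem.List.pyGet? playerCards a).getD "" == "King Hearts" then points.set a.toNat 13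
  else if (PySem.List.pyGet? playerCards a).getD "" == "Ace Hearts" then points.set a.toNat 14
  else if (PySem.List.pyGet? playerCards a).getD "" == "9 Diamonds" then points.set a.toNat 9
  else if (PySem.List.pyGet? playerCards a).getD "" == "10 Diamonds" then points.set a.toNat 10
  else if (PySem.List.pyGet? playerCards a).getD "" == "Jack Diamonds" then points.set a.toNat 11
  else if (PySem.List.pyGet? playerCards a).getD "" == "Queen Diamonds" then points.set a.toNat 12
  else if (PySem.List.pyGet? playerCards a).getD "" == "King Diamonds" then points.set a.toNat 13
  else if (PySem.List.pyGet? playerCards a).getD "" == "Ace Diamonds" then points.set a.toNat 14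
  else points

-- Second statement: 'if trump in playerCards[a]: points[a] = points[a] + 50'.
def pvAddTrump (playerCards : List String) (trump : String) (points : List Int) (a : Int) : List Int :=
  if PySem.Str.isIn trump ((PySem.List.pyGet? playerCards a).getD "") then
    points.set a.toNat ((PySem.List.pyGet? points a).getD 0 + 50)
  else points

def assignPoints (playerCards : List String) (trump : String) : List Int :=
  (PySem.List.pyRange 0 4 1).foldl
    (fun points a => pvAddTrump playerCards trump (pvAssignRank playerCards points a) a)
    [-1, -1, -1, -1]

-- ===== PORT B =====
-- Ranks in order (value = 9 + position) and the four suits; the String constants of Source B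
-- are handled as their character lists (exact: String ↔ List Char).
def pvRanksB : List (List Char) :=
  [['9'], ['1','0'], ['J','a','c','k'], ['Q','u','e','e','n'], ['K','i','n','g'], ['A','c','e']]
def pvSuitsB : List (List Char) :=
  [['S','p','a','d','e','s'], ['C','l','u','b','s'], ['H','e','a','r','t','s'],
   ['D','i','a','m','o','n','d','s']]

-- Hand port of card.partition(" ") (PySem has no partition): returns
-- (before first space, whether a space was found, after it); exact on every string.
def pvPartition : List Char → List Char × Bool × List Char
  | [] => ([], false, [])
  | c :: rest =>
    if c = ' ' then ([], true, rest)
    else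
      let t := pvPartition rest
      (c :: t.1, t.2.1, t.2.2)

-- port of Source B's _cardValue: parse, validate suit and rank, value = 9 + RANKS.index(rank)
def pvCardValue (card : String) : Int :=
  let t := pvPartition card.toList
  if pvSuitsB.contains t.2.2 && pvRanksB.contains t.1 then
    9 + (((PySem.List.index? pvRanksB t.1).getD 0 : Nat) : Int)
  else -1

def assignPoints_alt (playerCards : List String) (trump : String) : List Int :=
  (PySem.List.pyRange 0 4 1).foldl
    (fun points a =>
      let card := (PySem.List.pyGet? playerCards a).getD ""
      let v := pvCardValue card
      let v2 := if PySem.Str.isIn trump card then v + 50 else v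
      points ++ [v2])
    []

-- ===== PRECONDITION & SPEC =====
-- Python A raises IndexError when len(playerCards) < 4 (the loop reads playerCards[0..3]).
def Pre_assignPoints (playerCards : List String) (trump : String) : Prop :=
  4 ≤ playerCards.length
instance (playerCards : List String) (trump : String) : Decidable (Pre_assignPoints playerCards trump) := by unfold Pre_assignPoints; infer_instance
def pvWitness_assignPoints : List String × String :=
  (["9 Spades", "Ace Hearts", "Jack Clubs", "foo"], "Hearts")

def Spec_assignPoints (playerCards : List String) (trump : String) (out : List Int) : Prop := out = assignPoints_alt playerCards trump
instance (playerCards : List String) (trump : String) (out : List Int) : Decidable (Spec_assignPoints playerCards trump out) := by unfold Spec_assignPoints; infer_instance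

-- ===== CLAIM (what is proved, stated in full; the proofs are below) =====
def Claim_equal_assignPoints : Prop := ∀ (playerCards : List String) (trump : String), Dom_assignPoints playerCards trump → Pre_assignPoints playerCards trump → Spec_assignPoints playerCards trump (assignPoints playerCards trump)

-- ===== LEMMAS AND PROOFS =====

-- the value one loop iteration of A stores at slot a (chain in A's order, before the bonus)
def pvChain (c : String) : Int :=
  if c == "9 Spades" then 9
  else if c == "10 Spades" then 10
  else if c == "Jack Spades" then 11
  else if c == "Queen Spades" then 12
  else if c == "King Spades" then 13
  else if c == "Ace Spades" then 14
  else if c == "9 Clubs" then 9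
  else if c == "10 Clubs" then 10
  else if c == "Jack Clubs" then 11
  else if c == "Queen Clubs" then 12
  else if c == "King Clubs" then 13
  else if c == "Ace Clubs" then 14
  else if c == "9 Hearts" then 9
  else if c == "10 Hearts" then 10
  else if c == "Jack Hearts" then 11
  else if c == "Queen Hearts" then 12
  else if c == "King Hearts" then 13
  else if c == "Ace Hearts" then 14
  else if c == "9 Diamonds" then 9
  else if c == "10 Diamonds" then 10
  else if c == "Jack Diamonds" then 11
  else if c == "Queen Diamonds" then 12
  else if c == "King Diamonds" then 13
  else if c == "Ace Diamonds" then 14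
  else -1

def pvLits : List String :=
  ["9 Spades", "10 Spades", "Jack Spades", "Queen Spades", "King Spades", "Ace Spades",
   "9 Clubs", "10 Clubs", "Jack Clubs", "Queen Clubs", "King Clubs", "Ace Clubs",
   "9 Hearts", "10 Hearts", "Jack Hearts", "Queen Hearts", "King Hearts", "Ace Hearts",
   "9 Diamonds", "10 Diamonds", "Jack Diamonds", "Queen Diamonds", "King Diamonds", "Ace Diamonds"]

theorem pvPartition_true (l : List Char) (h : (pvPartition l).2.1 = true) :
    l = (pvPartition l).1 ++ ' ' :: (pvPartition l).2.2 := by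
  induction l with
  | nil => simp [pvPartition] at h
  | cons c rest ih =>
    by_cases hc : c = ' '
    · simp [pvPartition, hc]
    · simp only [pvPartition, if_neg hc] at h ⊢
      exact congrArg (c :: ·) (ih h)

theorem pvPartition_false (l : List Char) (h : (pvPartition l).2.1 = false) :
    (pvPartition l).2.2 = [] := by
  induction l with
  | nil => simp [pvPartition]
  | cons c rest ih =>
    by_cases hc : c = ' '
    · simp [pvPartition, hc] at h
    · simp only [pvPartition, if_neg hc] at h ⊢
      exact ih h

theorem pvOfToList (c : String) (l : List Char) (h : c.toList = l) : c = String.ofList l := by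
  have := congrArg String.ofList h
  rwa [String.ofList_toList] at this

-- if B's parse-and-validate accepts c, then c is one of the 24 card names
theorem pvCardValue_mem (c : String) (h : pvCardValue c ≠ -1) : c ∈ pvLits := by
  unfold pvCardValue at h
  by_cases hb : (pvSuitsB.contains (pvPartition c.toList).2.2
      && pvRanksB.contains (pvPartition c.toList).1) = true
  · have hs := hb
    simp only [Bool.and_eq_true, List.contains_eq_mem, decide_eq_true_eq] at hs
    obtain ⟨hsuit, hrank⟩ := hs
    have hf : (pvPartition c.toList).2.1 = true := by
      by_contra hf
      have := pvPartition_false c.toList (by simpa using Bool.eq_false_iff.mpr hf)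
      rw [this] at hsuit
      simp [pvSuitsB] at hsuit
    have hrec := pvPartition_true c.toList hf
    simp only [pvRanksB, List.mem_cons, List.not_mem_nil, or_false] at hrank
    simp only [pvSuitsB, List.mem_cons, List.not_mem_nil, or_false] at hsuit
    rcases hrank with hr|hr|hr|hr|hr|hr <;> rcases hsuit with hs|hs|hs|hs <;>
      · rw [hr, hs] at hrec
        rw [pvOfToList c _ hrec]
        decide
  · rw [if_neg hb] at h
    exact absurd rfl h

theorem pvCardValue_eq_chain (c : String) : pvCardValue c = pvChain c := by
  by_cases hc : c ∈ pvLits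
  · simp only [pvLits, List.mem_cons, List.not_mem_nil, or_false] at hc
    rcases hc with rfl|rfl|rfl|rfl|rfl|rfl|rfl|rfl|rfl|rfl|rfl|rfl|rfl|rfl|rfl|rfl|rfl|rfl|rfl|rfl|rfl|rfl|rfl|rfl <;> decide
  · have h1 : pvCardValue c = -1 := by
      by_contra h
      exact hc (pvCardValue_mem c h)
    have hne : ∀ s ∈ pvLits, ¬ (c == s) = true := by
      intro s hs hcs
      exact hc (by rw [eq_of_beq hcs]; exact hs)
    rw [h1]
    unfold pvChain
    rw [if_neg (hne _ (by decide)), if_neg (hne _ (by decide)), if_neg (hne _ (by decide)),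
        if_neg (hne _ (by decide)), if_neg (hne _ (by decide)), if_neg (hne _ (by decide)),
        if_neg (hne _ (by decide)), if_neg (hne _ (by decide)), if_neg (hne _ (by decide)),
        if_neg (hne _ (by decide)), if_neg (hne _ (by decide)), if_neg (hne _ (by decide)),
        if_neg (hne _ (by decide)), if_neg (hne _ (by decide)), if_neg (hne _ (by decide)),
        if_neg (hne _ (by decide)), if_neg (hne _ (by decide)), if_neg (hne _ (by decide)),
        if_neg (hne _ (by decide)), if_neg (hne _ (by decide)), if_neg (hne _ (by decide)),
        if_neg (hne _ (by decide)), if_neg (hne _ (by decide)), if_neg (hne _ (by decide))]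

theorem pvRank0 (pc : List String) (y1 y2 y3 : Int) :
    pvAssignRank pc [-1, y1, y2, y3] 0 = [pvChain ((PySem.List.pyGet? pc 0).getD ""), y1, y2, y3] := by
  unfold pvAssignRank pvChain
  simp only [List.set, (by decide : (0:Int).toNat = 0)]
  simp only [← apply_ite (fun x : Int => x :: [y1, y2, y3])]

theorem pvRank1 (pc : List String) (y0 y2 y3 : Int) :
    pvAssignRank pc [y0, -1, y2, y3] 1 = [y0, pvChain ((PySem.List.pyGet? pc 1).getD ""), y2, y3] := by
  unfold pvAssignRank pvChain
  simp only [List.set, (by decide : (1:Int).toNat = 1)]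
  simp only [← apply_ite (fun x : Int => y0 :: x :: [y2, y3])]

theorem pvRank2 (pc : List String) (y0 y1 y3 : Int) :
    pvAssignRank pc [y0, y1, -1, y3] 2 = [y0, y1, pvChain ((PySem.List.pyGet? pc 2).getD ""), y3] := by
  unfold pvAssignRank pvChain
  simp only [List.set, (by decide : (2:Int).toNat = 2)]
  simp only [← apply_ite (fun x : Int => y0 :: y1 :: x :: [y3])]

theorem pvRank3 (pc : List String) (y0 y1 y2 : Int) :
    pvAssignRank pc [y0, y1, y2, -1] 3 = [y0, y1, y2, pvChain ((PySem.List.pyGet? pc 3).getD "")] := by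
  unfold pvAssignRank pvChain
  simp only [List.set, (by decide : (3:Int).toNat = 3)]
  simp only [← apply_ite (fun x : Int => y0 :: y1 :: y2 :: [x])]

theorem pvTrump0 (pc : List String) (t : String) (v y1 y2 y3 : Int) :
    pvAddTrump pc t [v, y1, y2, y3] 0
      = [if PySem.Str.isIn t ((PySem.List.pyGet? pc 0).getD "") then v + 50 else v, y1, y2, y3] := by
  unfold pvAddTrump; split_ifs <;> simp [PySem.List.pyGet?, PySem.List.pyIdx?]

theorem pvTrump1 (pc : List String) (t : String) (y0 v y2 y3 : Int) :
    pvAddTrump pc t [y0, v, y2, y3] 1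
      = [y0, if PySem.Str.isIn t ((PySem.List.pyGet? pc 1).getD "") then v + 50 else v, y2, y3] := by
  unfold pvAddTrump; split_ifs <;> simp [PySem.List.pyGet?, PySem.List.pyIdx?]

theorem pvTrump2 (pc : List String) (t : String) (y0 y1 v y3 : Int) :
    pvAddTrump pc t [y0, y1, v, y3] 2
      = [y0, y1, if PySem.Str.isIn t ((PySem.List.pyGet? pc 2).getD "") then v + 50 else v, y3] := by
  unfold pvAddTrump; split_ifs <;> simp [PySem.List.pyGet?, PySem.List.pyIdx?]

theorem pvTrump3 (pc : List String) (t : String) (y0 y1 y2 v : Int) :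
    pvAddTrump pc t [y0, y1, y2, v] 3
      = [y0, y1, y2, if PySem.Str.isIn t ((PySem.List.pyGet? pc 3).getD "") then v + 50 else v] := by
  unfold pvAddTrump; split_ifs <;> simp [PySem.List.pyGet?, PySem.List.pyIdx?]

-- ===== VERDICT (by name: the statement is the Claim_ definition above) =====
set_option maxHeartbeats 2000000 in
theorem assignPoints_spec : Claim_equal_assignPoints := by
  intro pc t _ _
  show assignPoints pc t = assignPoints_alt pc t
  have hr : PySem.List.pyRange 0 4 1 = [0, 1, 2, 3] := by decide
  rw [assignPoints, assignPoints_alt, hr]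
  simp only [List.foldl_cons, List.foldl_nil]
  rw [pvRank0, pvTrump0, pvRank1, pvTrump1, pvRank2, pvTrump2, pvRank3, pvTrump3]
  simp only [pvCardValue_eq_chain, List.nil_append, List.cons_append]
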